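-- pv_equiv track=rewrite | github.com/Lyoko-Jeremie/UAV | uav/FH0C/image_receiver.py | _cluster_missing_ranges
-- ===== SOURCE A (Python) =====
-- def _cluster_missing_ranges(missing_ids):
--     """
--     将缺失包ID聚类为连续区间。
--     输入: 有序缺失包ID列表
--     输出: 区间列表 [[start1, end1], ...]
--     """
--     if not missing_ids:
--         return []
--     ranges = []
--     start = prev = missing_ids[0]
--     for idx in missing_ids[1:]:
--         if idx == prev + 1:
--             prev = idx
--         else:
--             ranges.append([start, prev])
--             start = prev = idx
--     ranges.append([start, prev])
--     return ranges
-- ===== SOURCE B (Python) =====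
-- from itertools import groupby
--
--
-- def _cluster_missing_ranges(missing_ids):
--     ranges = []
--     for _, grp in groupby(enumerate(missing_ids), key=lambda p: p[1] - p[0]):
--         vals = [v for _, v in grp]
--         ranges.append([vals[0], vals[-1]])
--     return ranges
-- ===== Notes on version B (the rewrite author's own statement) =====
-- stated objective: idiomatic
-- what changed: Replaced the running start/prev accumulator loop with the standard itertools.groupby-over-enumerate idiom keyed by value minus index, emitting [first, last] of each group.
import Mathlib
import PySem

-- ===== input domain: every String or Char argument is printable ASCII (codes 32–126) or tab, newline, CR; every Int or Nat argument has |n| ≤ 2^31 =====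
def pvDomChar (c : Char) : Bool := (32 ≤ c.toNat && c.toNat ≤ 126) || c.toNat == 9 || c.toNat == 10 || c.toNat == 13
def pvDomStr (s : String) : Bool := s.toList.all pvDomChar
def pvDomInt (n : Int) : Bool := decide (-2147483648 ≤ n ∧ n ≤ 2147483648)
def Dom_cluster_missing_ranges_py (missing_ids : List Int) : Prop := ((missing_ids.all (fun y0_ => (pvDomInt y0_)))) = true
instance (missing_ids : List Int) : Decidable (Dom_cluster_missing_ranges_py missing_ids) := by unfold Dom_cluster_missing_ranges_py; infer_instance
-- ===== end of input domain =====

-- B replaces A's running start/prev accumulator with the idiomatic groupby-over-enumerate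
-- (key = value - index) pass; same O(n) cost, proved to return exactly A's value.


-- ===== PORT A =====
-- literal transliteration: early return on empty, then a fold over missing_ids[1:]
-- carrying the state (ranges, start, prev).
def cluster_missing_ranges_py (missing_ids : List Int) : List (List Int) :=
  match missing_ids with
  | [] => []
  | x :: xs =>
    let st : List (List Int) × Int × Int :=
      xs.foldl (fun s idx =>
        if idx = s.2.2 + 1 then (s.1, s.2.1, idx)
        else (s.1 ++ [[s.2.1, s.2.2]], idx, idx)) ([], x, x)
    st.1 ++ [[st.2.1, st.2.2]]

-- ===== PORT B =====
-- groupby(enumerate(xs), key = p ↦ p.2 - p.1): split the enumerated list into maximal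
-- runs of equal key (value minus index), exactly as itertools.groupby does.
def altGroups : List (Int × Int) → List (List (Int × Int))
  | [] => []
  | p :: rest =>
    match altGroups rest with
    | [] => [[p]]
    | [] :: gs => [p] :: gs   -- unreachable: groups are never empty
    | (q :: g) :: gs =>
      if p.2 - p.1 = q.2 - q.1 then (p :: q :: g) :: gs
      else [p] :: (q :: g) :: gs

-- vals[0] / vals[-1] of a group (groups are nonempty; [] case unreachable)
def altEmit (g : List (Int × Int)) : List Int :=
  match g with
  | [] => []
  | p :: rest => [p.2, (rest.getLastD p).2]

def cluster_missing_ranges_py_alt (missing_ids : List Int) : List (List Int) :=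
  (altGroups (PySem.List.enumerate missing_ids)).map altEmit

-- ===== PRECONDITION & SPEC =====
def Spec_cluster_missing_ranges_py (missing_ids : List Int) (out : List (List Int)) : Prop := out = cluster_missing_ranges_py_alt missing_ids
instance (missing_ids : List Int) (out : List (List Int)) : Decidable (Spec_cluster_missing_ranges_py missing_ids out) := by unfold Spec_cluster_missing_ranges_py; infer_instance

-- ===== CLAIM (what is proved, stated in full; the proofs are below) =====
def Claim_equal_cluster_missing_ranges_py : Prop := ∀ (missing_ids : List Int), Dom_cluster_missing_ranges_py missing_ids → Spec_cluster_missing_ranges_py missing_ids (cluster_missing_ranges_py missing_ids)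

-- ===== LEMMAS AND PROOFS =====

-- A's loop as structural recursion (start, prev carried; emit on break and at the end)
def aRec (start prev : Int) : List Int → List (List Int)
  | [] => [[start, prev]]
  | idx :: rest =>
    if idx = prev + 1 then aRec start idx rest
    else [start, prev] :: aRec idx idx rest

theorem aRec_foldl (vs : List Int) : ∀ (acc : List (List Int)) (start prev : Int),
    (let st := vs.foldl (fun (s : List (List Int) × Int × Int) idx =>
        if idx = s.2.2 + 1 then (s.1, s.2.1, idx)
        else (s.1 ++ [[s.2.1, s.2.2]], idx, idx)) (acc, start, prev)
     st.1 ++ [[st.2.1, st.2.2]]) = acc ++ aRec start prev vs := by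
  induction vs with
  | nil => intro acc start prev; simp [aRec]
  | cons idx rest ih =>
    intro acc start prev
    simp only [List.foldl_cons, aRec]
    by_cases h : idx = prev + 1
    · simp [h, ih]
    · simp [h, ih, List.append_assoc]

-- the first group of altGroups (enumerate (v :: vs) i) begins with (i, v)
theorem altGroups_head (vs : List Int) : ∀ (i v : Int),
    ∃ g gs, altGroups (PySem.List.enumerate (v :: vs) i) = ((i, v) :: g) :: gs := by
  induction vs with
  | nil =>
    intro i v
    exact ⟨[], [], by simp [PySem.List.enumerate_cons, PySem.List.enumerate_nil, altGroups]⟩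
  | cons w ws ih =>
    intro i v
    obtain ⟨g, gs, hg⟩ := ih (i + 1) w
    rw [PySem.List.enumerate_cons, altGroups, hg]
    by_cases h : v - i = w - (i + 1)
    · exact ⟨(i + 1, w) :: g, gs, by simp [h]⟩
    · exact ⟨[], ((i + 1, w) :: g) :: gs, by simp [h]⟩

-- overwrite the start of the first emitted range
def setStart (s : Int) : List (List Int) → List (List Int)
  | [] => []
  | g :: rs => (s :: g.drop 1) :: rs

-- main invariant: A's recursion, given carried (start, prev), equals B's grouping of
-- the remaining values enumerated from any base i, with the first range's start overwritten
theorem aRec_eq_groups (vs : List Int) : ∀ (i start prev : Int),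
    aRec start prev vs
      = setStart start ((altGroups (PySem.List.enumerate (prev :: vs) i)).map altEmit) := by
  induction vs with
  | nil =>
    intro i start prev
    simp [aRec, PySem.List.enumerate_cons, PySem.List.enumerate_nil, altGroups, altEmit, setStart]
  | cons w ws ih =>
    intro i start prev
    obtain ⟨g, gs, hg⟩ := altGroups_head ws (i + 1) w
    rw [PySem.List.enumerate_cons, altGroups, hg]
    by_cases h : w = prev + 1
    · have hk : prev - i = w - (i + 1) := by omega
      simp only [hk]
      have := ih (i + 1) start w
      rw [hg] at this
      simp only [aRec, if_pos h, this]
      cases g <;> simp [altEmit, setStart, List.getLastD]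
    · have hk : ¬ (prev - i = w - (i + 1)) := by omega
      simp only [if_neg hk]
      have := ih (i + 1) w w
      rw [hg] at this
      simp only [aRec, if_neg h, this]
      simp [altEmit, setStart]

-- ===== VERDICT (by name: the statement is the Claim_ definition above) =====
theorem cluster_missing_ranges_py_spec : Claim_equal_cluster_missing_ranges_py := by
  intro missing_ids _
  unfold Spec_cluster_missing_ranges_py
  cases missing_ids with
  | nil =>
    simp [cluster_missing_ranges_py, cluster_missing_ranges_py_alt,
      PySem.List.enumerate_nil, altGroups]
  | cons x xs =>
    obtain ⟨g, gs, hg⟩ := altGroups_head xs 0 x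
    have h1 := aRec_foldl xs [] x x
    have h2 := aRec_eq_groups xs 0 x x
    simp only [List.nil_append] at h1
    simp only [cluster_missing_ranges_py, cluster_missing_ranges_py_alt]
    rw [h1, h2, hg]
    simp [altEmit, setStart]
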